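-- pv_equiv track=rewrite | github.com/AlexMercedCoder/tutorialblog | publish_staging.py | strip_h1
-- ===== SOURCE A (Python) =====
-- def strip_h1(content):
--     """Remove the first H1 line from content."""
--     lines = content.splitlines()
--     result = []
--     h1_found = False
--     for line in lines:
--         if not h1_found and line.strip().startswith("# "):
--             h1_found = True
--             continue
--         result.append(line)
--     while result and not result[0].strip():
--         result.pop(0)
--     return "\n".join(result) + "\n"
-- ===== SOURCE B (Python) =====
-- def strip_h1(content):
--     """Remove the first H1 line from content."""
--     lines = content.splitlines()
--     i = next((k for k, l in enumerate(lines) if l.strip().startswith("# ")), None)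
--     if i is not None:
--         lines = lines[:i] + lines[i + 1:]
--     j = next((k for k, l in enumerate(lines) if l.strip()), len(lines))
--     return "\n".join(lines[j:]) + "\n"
-- ===== Notes on version B (the rewrite author's own statement) =====
-- stated objective: alternative
-- what changed: Replaces A's stateful accumulate-then-pop loop (flag + append + while-pop of leading blanks) by two index scans: find the first H1 line and remove it by slicing, then find the first non-blank line and slice from there.
import Mathlib
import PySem

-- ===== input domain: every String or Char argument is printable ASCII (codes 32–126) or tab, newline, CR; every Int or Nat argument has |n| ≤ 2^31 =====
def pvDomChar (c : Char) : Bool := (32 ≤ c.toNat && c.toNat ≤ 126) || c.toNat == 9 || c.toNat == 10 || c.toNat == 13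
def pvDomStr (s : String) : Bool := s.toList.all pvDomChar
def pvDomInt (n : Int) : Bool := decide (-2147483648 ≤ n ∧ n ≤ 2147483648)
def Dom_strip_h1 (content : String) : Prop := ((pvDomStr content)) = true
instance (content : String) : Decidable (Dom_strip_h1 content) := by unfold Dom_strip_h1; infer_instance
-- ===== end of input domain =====

-- B replaces A's stateful accumulate-then-pop loop by two index scans with slicing; objective: alternative decomposition, same cost.

-- ===== PORT A =====
-- the body of A's for-loop: state = (result, h1_found)
def stripH1Step (st : List String × Bool) (line : String) : List String × Bool :=
  if !st.2 && PySem.Str.startswith (PySem.Str.strip line) "# " then (st.1, true)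
  else (st.1 ++ [line], st.2)

-- A's 'while result and not result[0].strip(): result.pop(0)'
def stripH1Pop : List String → List String
  | [] => []
  | l :: ls => if PySem.Str.strip l == "" then stripH1Pop ls else l :: ls

def strip_h1 (content : String) : String :=
  let lines := PySem.Str.splitlines content
  let result := (lines.foldl stripH1Step ([], false)).1
  PySem.Str.join "\n" (stripH1Pop result) ++ "\n"

-- ===== PORT B =====
def strip_h1_alt (content : String) : String :=
  let lines := PySem.Str.splitlines content
  let lines2 :=
    match lines.findIdx? (fun l => PySem.Str.startswith (PySem.Str.strip l) "# ") with
    | some i => lines.take i ++ lines.drop (i + 1)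
    | none => lines
  let j := (lines2.findIdx? (fun l => !(PySem.Str.strip l == ""))).getD lines2.length
  PySem.Str.join "\n" (lines2.drop j) ++ "\n"

-- ===== PRECONDITION & SPEC =====
def Spec_strip_h1 (content : String) (out : String) : Prop := out = strip_h1_alt content
instance (content : String) (out : String) : Decidable (Spec_strip_h1 content out) := by unfold Spec_strip_h1; infer_instance

-- ===== CLAIM (what is proved, stated in full; the proofs are below) =====
def Claim_equal_strip_h1 : Prop := ∀ (content : String), Dom_strip_h1 content → Spec_strip_h1 content (strip_h1 content)

-- ===== LEMMAS AND PROOFS =====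

-- once the flag is set, the loop only appends
theorem stripH1_foldl_true (lines acc : List String) :
    (lines.foldl stripH1Step (acc, true)).1 = acc ++ lines := by
  induction lines generalizing acc with
  | nil => simp
  | cons l ls ih =>
    simp only [List.foldl_cons, stripH1Step]
    simp [ih]

-- A's loop with flag unset removes the first H1 line, index-and-slice style
theorem stripH1_foldl_false (lines acc : List String) :
    (lines.foldl stripH1Step (acc, false)).1 =
      acc ++ (match lines.findIdx? (fun l => PySem.Str.startswith (PySem.Str.strip l) "# ") with
              | some i => lines.take i ++ lines.drop (i + 1)
              | none => lines) := by
  induction lines generalizing acc with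
  | nil => simp
  | cons l ls ih =>
    by_cases h : PySem.Str.startswith (PySem.Str.strip l) "# " = true
    · simp only [List.foldl_cons, stripH1Step, Bool.not_false, Bool.true_and]
      rw [if_pos h, List.findIdx?_cons, if_pos h]
      simp [stripH1_foldl_true]
    · simp only [List.foldl_cons, stripH1Step, Bool.not_false, Bool.true_and]
      rw [if_neg h, ih, List.findIdx?_cons, if_neg h]
      cases hf : ls.findIdx? (fun l => PySem.Str.startswith (PySem.Str.strip l) "# ") with
      | none => simp
      | some i => simp [List.take_succ_cons, List.drop_succ_cons]

-- A's pop-while equals dropping up to the first non-blank index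
theorem stripH1Pop_eq (xs : List String) :
    stripH1Pop xs = xs.drop ((xs.findIdx? (fun l => !(PySem.Str.strip l == ""))).getD xs.length) := by
  induction xs with
  | nil => rfl
  | cons l ls ih =>
    by_cases h : (PySem.Str.strip l == "") = true
    · rw [stripH1Pop, if_pos h, ih, List.findIdx?_cons,
        if_neg (by rw [h]; exact (by decide : ¬(!true) = true))]
      cases hf : ls.findIdx? (fun l => !(PySem.Str.strip l == "")) with
      | none => simp
      | some i => simp
    · have h' : (PySem.Str.strip l == "") = false := eq_false_of_ne_true h
      rw [stripH1Pop, if_neg h, List.findIdx?_cons, if_pos (by rw [h']; decide)]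
      simp

-- ===== VERDICT (by name: the statement is the Claim_ definition above) =====
theorem strip_h1_spec : Claim_equal_strip_h1 := by
  intro content _
  unfold Spec_strip_h1 strip_h1 strip_h1_alt
  simp only [stripH1_foldl_false, List.nil_append, stripH1Pop_eq]
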